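-- pv_equiv track=rewrite | github.com/noTirT/AdventOfCode | 2023/day3/part1.py | eliminate_neighbor_locations
-- ===== SOURCE A (Python) =====
-- def eliminate_neighbor_locations(locations):
--     locations = sorted(locations)
--     result = [locations[0]]
--     index = 1
--     while index < len(locations):
--         if locations[index - 1][0] != locations[index][0]:
--             result.append(locations[index])
--         else:
--             if abs(locations[index - 1][1] - locations[index][1]) != 1:
--                 result.append(locations[index])
--         index += 1
--     return result
-- ===== SOURCE B (Python) =====
-- def _group_rows(s):
--     # split the sorted list into maximal runs sharing the same row (first coordinate)
--     groups = []
--     i = 0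
--     while i < len(s):
--         j = i
--         while j < len(s) and s[j][0] == s[i][0]:
--             j += 1
--         groups.append(s[i:j])
--         i = j
--     return groups
--
--
-- def eliminate_neighbor_locations(locations):
--     result = []
--     for grp in _group_rows(sorted(locations)):
--         result.append(grp[0])
--         result.extend(cur for prev, cur in zip(grp, grp[1:]) if abs(prev[1] - cur[1]) != 1)
--     return result
-- ===== Notes on version B (the rewrite author's own statement) =====
-- stated objective: alternative
-- what changed: Instead of A's single flat index scan with a same-row branch, B first splits the sorted list into maximal same-row groups and then, per group, keeps the first element and every element whose column differs from its predecessor by other than 1 (a zip over adjacent pairs).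
import Mathlib
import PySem

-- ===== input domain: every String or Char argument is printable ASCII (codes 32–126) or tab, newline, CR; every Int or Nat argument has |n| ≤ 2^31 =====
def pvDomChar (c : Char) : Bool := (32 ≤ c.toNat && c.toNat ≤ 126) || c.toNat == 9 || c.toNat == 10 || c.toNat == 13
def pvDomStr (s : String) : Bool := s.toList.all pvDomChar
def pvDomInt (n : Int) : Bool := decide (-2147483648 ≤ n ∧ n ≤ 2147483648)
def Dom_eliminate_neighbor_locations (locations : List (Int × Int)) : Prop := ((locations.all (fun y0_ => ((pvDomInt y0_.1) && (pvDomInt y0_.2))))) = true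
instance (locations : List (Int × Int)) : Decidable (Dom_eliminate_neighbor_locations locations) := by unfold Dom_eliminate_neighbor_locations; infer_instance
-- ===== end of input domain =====

-- B splits the sorted list into same-row groups and filters each group by adjacent column pairs,
-- replacing A's flat index scan (objective: alternative decomposition; A raises IndexError on [], excluded by Pre_).


-- ===== PORT A =====
-- the while loop over `index`; Python indexes `index-1` and `index` are nonnegative and in range
-- whenever taken, so List.getD is exact there
def pvALoop (s : List (Int × Int)) (result : List (Int × Int)) (index : Nat) : List (Int × Int) :=
  if index < s.length then
    let prev := s.getD (index - 1) (0, 0)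
    let cur := s.getD index (0, 0)
    let result :=
      if prev.1 ≠ cur.1 then result ++ [cur]
      else if (prev.2 - cur.2).natAbs ≠ 1 then result ++ [cur] else result
    pvALoop s result (index + 1)
  else result
termination_by s.length - index

def eliminate_neighbor_locations (locations : List (Int × Int)) : List (Int × Int) :=
  let s := PySem.List.sorted2 locations Prod.fst Prod.snd
  -- result = [locations[0]]: under Pre_ the list is nonempty, so getD 0 is exact
  pvALoop s [s.getD 0 (0, 0)] 1

-- ===== PORT B =====
-- _group_rows: the inner `while j` scan is exactly takeWhile / dropWhile of the same predicate,
-- and s[i:j] is the taken prefix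
def pvGroupRows (s : List (Int × Int)) : List (List (Int × Int)) :=
  match s with
  | [] => []
  | x :: xs =>
      (x :: xs.takeWhile (fun y => y.1 == x.1)) :: pvGroupRows (xs.dropWhile (fun y => y.1 == x.1))
termination_by s.length
decreasing_by simp only [List.length_cons]; exact Nat.lt_succ_of_le (List.length_dropWhile_le _ xs)

-- per-group body: grp[0] plus the zip(grp, grp[1:]) filter
def pvKeepGroup (grp : List (Int × Int)) : List (Int × Int) :=
  match grp with
  | [] => []
  | x :: xs =>
      x :: ((x :: xs).zip xs).filterMap
        (fun pc => if (pc.1.2 - pc.2.2).natAbs ≠ 1 then some pc.2 else none)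

def eliminate_neighbor_locations_alt (locations : List (Int × Int)) : List (Int × Int) :=
  (pvGroupRows (PySem.List.sorted2 locations Prod.fst Prod.snd)).foldl
    (fun result grp => result ++ pvKeepGroup grp) []

-- ===== PRECONDITION & SPEC =====
-- A indexes locations[0] after sorting, so it raises IndexError on the empty list: excluded.
def Pre_eliminate_neighbor_locations (locations : List (Int × Int)) : Prop := locations ≠ []
instance (locations : List (Int × Int)) : Decidable (Pre_eliminate_neighbor_locations locations) := by
  unfold Pre_eliminate_neighbor_locations; infer_instance
def pvWitness_eliminate_neighbor_locations : (List (Int × Int)) := [(0, 0), (0, 1), (1, 5)]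

def Spec_eliminate_neighbor_locations (locations : List (Int × Int)) (out : List (Int × Int)) : Prop :=
  out = eliminate_neighbor_locations_alt locations
instance (locations : List (Int × Int)) (out : List (Int × Int)) : Decidable (Spec_eliminate_neighbor_locations locations out) := by
  unfold Spec_eliminate_neighbor_locations; infer_instance

-- ===== CLAIM (what is proved, stated in full; the proofs are below) =====
def Claim_equal_eliminate_neighbor_locations : Prop := ∀ (locations : List (Int × Int)), Dom_eliminate_neighbor_locations locations → Pre_eliminate_neighbor_locations locations → Spec_eliminate_neighbor_locations locations (eliminate_neighbor_locations locations)
-- ===== LEMMAS AND PROOFS =====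

-- common characterisation: the pairwise filter over adjacent elements of the sorted list
def pvPF : (Int × Int) → List (Int × Int) → List (Int × Int)
  | _, [] => []
  | p, c :: r => (if p.1 ≠ c.1 ∨ (p.2 - c.2).natAbs ≠ 1 then [c] else []) ++ pvPF c r

-- same-row pairwise filter (pvPF restricted to a group)
def pvZF : (Int × Int) → List (Int × Int) → List (Int × Int)
  | _, [] => []
  | p, c :: r => (if (p.2 - c.2).natAbs ≠ 1 then [c] else []) ++ pvZF c r

theorem aLoop_pf : ∀ (k : Nat) (s : List (Int × Int)) (n : Nat) (prev : Int × Int) (res : List (Int × Int)),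
    s.length - n = k → s.drop n = prev :: s.drop (n + 1) →
    pvALoop s res (n + 1) = res ++ pvPF prev (s.drop (n + 1)) := by
  intro k
  induction k with
  | zero =>
      intro s n prev res hk hd
      have : s.length ≤ n := Nat.le_of_sub_eq_zero hk
      simp [List.drop_eq_nil_of_le this] at hd
  | succ k ih =>
      intro s n prev res hk hd
      have hn : n < s.length := by
        by_contra h
        simp [List.drop_eq_nil_of_le (Nat.le_of_not_lt h)] at hd
      have hprev : s[n] = prev := by
        have h2 := List.drop_eq_getElem_cons hn
        rw [h2] at hd
        exact (List.cons.injEq _ _ _ _ ▸ hd).1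
      rw [pvALoop]
      by_cases h1 : n + 1 < s.length
      · have hd1 : s.drop (n + 1) = s[n + 1] :: s.drop (n + 2) := List.drop_eq_getElem_cons h1
        have hk1 : s.length - (n + 1) = k := by omega
        rw [if_pos h1]
        show pvALoop s
            (if (s.getD (n + 1 - 1) (0, 0)).1 ≠ (s.getD (n + 1) (0, 0)).1 then
               res ++ [s.getD (n + 1) (0, 0)]
             else if ((s.getD (n + 1 - 1) (0, 0)).2 - (s.getD (n + 1) (0, 0)).2).natAbs ≠ 1 then
               res ++ [s.getD (n + 1) (0, 0)]
             else res) (n + 1 + 1) = res ++ pvPF prev (s.drop (n + 1))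
        have hm1 : n + 1 - 1 = n := rfl
        rw [hm1, List.getD_eq_getElem _ _ hn, List.getD_eq_getElem _ _ h1, hprev,
            ih s (n + 1) s[n + 1] _ hk1 hd1, hd1]
        simp only [pvPF]
        by_cases hr : prev.1 ≠ (s[n + 1]).1
        · simp [hr, List.append_assoc]
        · by_cases hc : (prev.2 - (s[n + 1]).2).natAbs ≠ 1 <;>
            simp [hr, hc, List.append_assoc]
      · have hnil : s.drop (n + 1) = [] := List.drop_eq_nil_of_le (Nat.le_of_not_lt h1)
        rw [if_neg h1, hnil]
        simp [pvPF]

theorem keepGroup_zf : ∀ (x : Int × Int) (xs : List (Int × Int)),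
    pvKeepGroup (x :: xs) = x :: pvZF x xs := by
  intro x xs
  simp only [pvKeepGroup, List.cons.injEq, true_and]
  induction xs generalizing x with
  | nil => rfl
  | cons c r ih =>
      have ihc := ih c
      simp only [List.zip_cons_cons, List.filterMap_cons, ne_eq, ite_not] at ihc ⊢
      by_cases hc : (x.2 - c.2).natAbs = 1 <;> simp [pvZF, hc, ihc]

theorem pf_group : ∀ (g : List (Int × Int)) (x : Int × Int) (rest : List (Int × Int)),
    (∀ y ∈ g, y.1 = x.1) → (∀ r ∈ rest.head?, r.1 ≠ x.1) →
    pvPF x (g ++ rest) =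
      pvZF x g ++ (match rest with | [] => [] | r :: t => r :: pvPF r t) := by
  intro g
  induction g with
  | nil =>
      intro x rest _ hr
      match rest with
      | [] => simp [pvZF, pvPF]
      | r :: t =>
          have hne : r.1 ≠ x.1 := hr r (by simp)
          simp only [List.nil_append, pvZF, pvPF]
          rw [if_pos (Or.inl (fun h => hne h.symm))]
          simp
  | cons c g' ih =>
      intro x rest hg hr
      have hc : c.1 = x.1 := hg c (by simp)
      have hg' : ∀ y ∈ g', y.1 = c.1 := fun y hy => (hg y (by simp [hy])).trans hc.symm
      have hr' : ∀ r ∈ rest.head?, r.1 ≠ c.1 := fun r h => hc ▸ hr r h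
      simp only [List.cons_append, pvPF, pvZF, hc, ne_eq, not_true_eq_false, false_or]
      rw [ih c rest hg' hr', List.append_assoc]

theorem groupRows_pf : ∀ (k : Nat) (s : List (Int × Int)), s.length = k →
    (pvGroupRows s).flatMap pvKeepGroup =
      (match s with | [] => [] | x :: xs => x :: pvPF x xs) := by
  intro k
  induction k using Nat.strong_induction_on with
  | _ k ih =>
      intro s hk
      match s with
      | [] => simp [pvGroupRows]
      | x :: xs =>
          rw [pvGroupRows]
          set p : Int × Int → Bool := fun y => y.1 == x.1 with hp
          have hsplit : xs.takeWhile p ++ xs.dropWhile p = xs := List.takeWhile_append_dropWhile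
          have htake : ∀ y ∈ xs.takeWhile p, y.1 = x.1 := by
            intro y hy
            have h2 := List.mem_takeWhile_imp hy
            simpa [hp] using h2
          have hhead : ∀ r ∈ (xs.dropWhile p).head?, r.1 ≠ x.1 := by
            intro r hr
            have h2 := List.head?_dropWhile_not p xs
            rw [Option.mem_def] at hr
            rw [hr] at h2
            simpa [hp] using h2
          simp only [List.flatMap_cons, keepGroup_zf]
          match hdw : xs.dropWhile p with
          | [] =>
              have hxs : xs.takeWhile p = xs := by
                conv_rhs => rw [← hsplit, hdw]
                simp
              have hpf := pf_group (xs.takeWhile p) x [] htake (by simp)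
              simp only [List.append_nil] at hpf
              simp only [pvGroupRows, List.flatMap_nil, List.append_nil]
              rw [← hpf, hxs]
          | r :: t =>
              rw [hdw] at hhead
              have hlt : (r :: t).length < k := by
                have hlen : (xs.takeWhile p).length + (xs.dropWhile p).length = xs.length := by
                  rw [← List.length_append, hsplit]
                rw [hdw] at hlen
                simp only [List.length_cons] at hlen hk ⊢
                omega
              have hrec := ih (r :: t).length hlt (r :: t) rfl
              have hpf := pf_group (xs.takeWhile p) x (r :: t) htake hhead
              have hxs : xs = xs.takeWhile p ++ r :: t := by
                conv_lhs => rw [← hsplit, hdw]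
              rw [hrec]
              conv_rhs => rw [hxs]
              rw [hpf]
              simp

theorem foldl_flatMap (gs : List (List (Int × Int))) : ∀ (acc : List (Int × Int)),
    gs.foldl (fun result grp => result ++ pvKeepGroup grp) acc = acc ++ gs.flatMap pvKeepGroup := by
  induction gs with
  | nil => simp
  | cons g gs ih => intro acc; simp [List.foldl_cons, ih, List.append_assoc]

-- ===== VERDICT (by name: the statement is the Claim_ definition above) =====
theorem eliminate_neighbor_locations_spec : Claim_equal_eliminate_neighbor_locations := by
  intro locations _ hpre
  unfold Spec_eliminate_neighbor_locations eliminate_neighbor_locations eliminate_neighbor_locations_alt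
  cases hse : PySem.List.sorted2 locations Prod.fst Prod.snd with
  | nil =>
      exfalso
      apply hpre
      have hperm := PySem.List.sorted2_perm locations Prod.fst Prod.snd false
      rw [hse] at hperm
      exact hperm.nil_eq.symm
  | cons x xs =>
      simp only [foldl_flatMap, List.nil_append]
      rw [groupRows_pf (x :: xs).length (x :: xs) rfl]
      have ha := aLoop_pf (xs.length + 1) (x :: xs) 0 x [(x :: xs).getD 0 (0, 0)] (by simp)
        (by simp)
      simpa using ha
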